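-- pv_equiv track=rewrite | github.com/Bmw4134/TRAXOVO_V1 | utils/start_time_parser.py | find_assignment_for_driver
-- ===== SOURCE A (Python) =====
-- def find_assignment_for_driver(driver_name, assignments):
--     """
--     Find assignment for a driver in the assignments list
--
--     Args:
--         driver_name (str): Driver name to look for
--         assignments (list): List of assignment dictionaries
--
--     Returns:
--         dict: Assignment for the driver or None
--     """
--     if not driver_name or not assignments:
--         return None
--
--     # Normalize driver name
--     driver_name = driver_name.upper().strip()
--
--     # Look for exact match
--     for assignment in assignments:
--         if assignment['driver_name'].upper().strip() == driver_name:
--             return assignment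
--
--     # Look for partial match (last name)
--     driver_parts = driver_name.split()
--     if len(driver_parts) > 0:
--         last_name = driver_parts[-1]
--         for assignment in assignments:
--             if last_name in assignment['driver_name'].upper().split():
--                 return assignment
--
--     # No match found
--     return None
-- ===== SOURCE B (Python) =====
-- def find_assignment_for_driver(driver_name, assignments):
--     if not driver_name or not assignments:
--         return None
--     name = driver_name.upper().strip()
--     parts = name.split()
--     last_name = parts[-1] if parts else None
--     partial = None
--     for assignment in assignments:
--         candidate = assignment['driver_name'].upper()
--         if candidate.strip() == name:
--             return assignment
--         if partial is None and last_name is not None and last_name in candidate.split():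
--             partial = assignment
--     return partial
-- ===== Notes on version B (the rewrite author's own statement) =====
-- stated objective: alternative
-- what changed: Replaces A's two full scans of the assignment list (an exact-match pass, then a separate last-name pass) with a single pass that returns an exact match immediately and remembers the first last-name match as a fallback.
-- outside the precondition, e.g. on find_assignment_for_driver('Bob', [{}]): A raises KeyError, B raises KeyError
import Mathlib
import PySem

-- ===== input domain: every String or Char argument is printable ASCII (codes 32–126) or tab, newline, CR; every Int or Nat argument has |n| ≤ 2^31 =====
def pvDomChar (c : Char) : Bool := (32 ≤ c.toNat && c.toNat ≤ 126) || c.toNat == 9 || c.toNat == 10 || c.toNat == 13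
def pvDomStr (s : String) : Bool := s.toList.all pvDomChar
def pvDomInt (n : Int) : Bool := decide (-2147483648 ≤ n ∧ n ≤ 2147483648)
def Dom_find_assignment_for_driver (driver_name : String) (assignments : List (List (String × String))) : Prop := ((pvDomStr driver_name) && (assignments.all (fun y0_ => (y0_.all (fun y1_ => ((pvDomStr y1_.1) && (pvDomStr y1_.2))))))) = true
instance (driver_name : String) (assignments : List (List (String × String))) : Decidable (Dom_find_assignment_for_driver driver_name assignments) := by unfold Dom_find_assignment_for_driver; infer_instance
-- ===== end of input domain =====

-- B replaces A's two scans (exact pass, then last-name pass) by a single pass that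
-- returns an exact match at once and remembers the first last-name match as fallback (objective: alternative one-pass decomposition).

-- ===== PORT A =====
-- assignment['driver_name']: under Pre_ the key is present; "" stands for the KeyError case (excluded by Pre_)
def pvA_name (a : List (String × String)) : String := PySem.Dict.getD (PySem.Dict.mk a) "driver_name" ""

-- first loop of A: exact match on upper().strip()
def pvA_exact (d : String) : List (List (String × String)) → Option (List (String × String))
  | [] => none
  | a :: rest => if PySem.Str.strip (PySem.Str.upper (pvA_name a)) = d then some a else pvA_exact d rest

-- second loop of A: last name among the upper().split() words
def pvA_partial (ln : String) : List (List (String × String)) → Option (List (String × String))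
  | [] => none
  | a :: rest => if ln ∈ PySem.Str.split₀ (PySem.Str.upper (pvA_name a)) then some a else pvA_partial ln rest

def find_assignment_for_driver (driver_name : String) (assignments : List (List (String × String))) : Option (List (String × String)) :=
  if driver_name = "" ∨ assignments = [] then none
  else
    let d := PySem.Str.strip (PySem.Str.upper driver_name)
    match pvA_exact d assignments with
    | some a => some a
    | none =>
        let parts := PySem.Str.split₀ d
        if 0 < parts.length then
          match PySem.List.pyGet? parts (-1) with   -- driver_parts[-1]
          | some ln => pvA_partial ln assignments
          | none => none                             -- unreachable: parts nonempty
        else none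

-- ===== PORT B =====
def pvB_name (a : List (String × String)) : String := PySem.Dict.getD (PySem.Dict.mk a) "driver_name" ""

-- single pass: return on exact match, remember first partial match
def pvB_loop (d : String) (ln : Option String) (partial_ : Option (List (String × String))) :
    List (List (String × String)) → Option (List (String × String))
  | [] => partial_
  | a :: rest =>
      let cand := PySem.Str.upper (pvB_name a)
      if PySem.Str.strip cand = d then some a
      else
        pvB_loop d ln
          (if partial_.isNone then
             match ln with
             | some l => if l ∈ PySem.Str.split₀ cand then some a else none
             | none => none
           else partial_) rest

def find_assignment_for_driver_alt (driver_name : String) (assignments : List (List (String × String))) : Option (List (String × String)) :=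
  if driver_name = "" ∨ assignments = [] then none
  else
    let d := PySem.Str.strip (PySem.Str.upper driver_name)
    let parts := PySem.Str.split₀ d
    let ln : Option String := if parts.isEmpty then none else PySem.List.pyGet? parts (-1)
    pvB_loop d ln none assignments

-- ===== PRECONDITION & SPEC =====
-- Pre_ excludes only inputs where A raises KeyError: an assignment without the
-- 'driver_name' key is reached (no earlier exact match, guard did not fire first).
def Pre_find_assignment_for_driver (driver_name : String) (assignments : List (List (String × String))) : Prop :=
  driver_name = "" ∨ assignments = [] ∨
  (∀ a ∈ assignments, (PySem.Dict.mk a).contains "driver_name" = true) ∨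
  (∃ a ∈ assignments.takeWhile (fun a => (PySem.Dict.mk a).contains "driver_name"),
     PySem.Str.strip (PySem.Str.upper (PySem.Dict.getD (PySem.Dict.mk a) "driver_name" "")) =
       PySem.Str.strip (PySem.Str.upper driver_name))
instance (driver_name : String) (assignments : List (List (String × String))) : Decidable (Pre_find_assignment_for_driver driver_name assignments) := by unfold Pre_find_assignment_for_driver; infer_instance

def pvWitness_find_assignment_for_driver : String × (List (List (String × String))) :=
  ("John Smith", [[("driver_name", "Bob Jones")], [("driver_name", "ANN SMITH")]])

def Spec_find_assignment_for_driver (driver_name : String) (assignments : List (List (String × String))) (out : Option (List (String × String))) : Prop := out = find_assignment_for_driver_alt driver_name assignments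
instance (driver_name : String) (assignments : List (List (String × String))) (out : Option (List (String × String))) : Decidable (Spec_find_assignment_for_driver driver_name assignments out) := by unfold Spec_find_assignment_for_driver; infer_instance

-- ===== CLAIM (what is proved, stated in full; the proofs are below) =====
def Claim_equal_find_assignment_for_driver : Prop := ∀ (driver_name : String) (assignments : List (List (String × String))), Dom_find_assignment_for_driver driver_name assignments → Pre_find_assignment_for_driver driver_name assignments → Spec_find_assignment_for_driver driver_name assignments (find_assignment_for_driver driver_name assignments)

-- ===== LEMMAS AND PROOFS =====

-- the one-pass loop equals: exact pass first; if it fails, the carried partial, else the partial pass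
theorem pvB_loop_eq (d : String) (ln : Option String) (p : Option (List (String × String)))
    (l : List (List (String × String))) :
    pvB_loop d ln p l =
      (match pvA_exact d l with
       | some a => some a
       | none =>
           match p with
           | some q => some q
           | none =>
               match ln with
               | some l' => pvA_partial l' l
               | none => none) := by
  induction l generalizing p with
  | nil => cases p <;> cases ln <;> simp [pvB_loop, pvA_exact, pvA_partial]
  | cons a rest ih =>
      simp only [pvB_loop, pvA_exact, pvA_name, pvB_name]
      by_cases hx : PySem.Str.strip (PySem.Str.upper (PySem.Dict.getD (PySem.Dict.mk a) "driver_name" "")) = d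
      · simp [hx]
      · simp only [hx, if_false]
        rw [ih]
        cases p with
        | some q => simp
        | none =>
            cases ln with
            | none => simp
            | some l' =>
                simp only [pvA_partial, pvA_name, Option.isNone_none]
                by_cases hm : l' ∈ PySem.Str.split₀ (PySem.Str.upper (PySem.Dict.getD (PySem.Dict.mk a) "driver_name" ""))
                · simp only [hm, if_true]
                · simp [hm]

-- ===== VERDICT (by name: the statement is the Claim_ definition above) =====
theorem find_assignment_for_driver_spec : Claim_equal_find_assignment_for_driver := by
  intro dn asg _ _
  unfold Spec_find_assignment_for_driver find_assignment_for_driver find_assignment_for_driver_alt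
  by_cases hg : dn = "" ∨ asg = []
  · simp [hg]
  · simp only [hg, if_false]
    rw [pvB_loop_eq]
    cases hE : pvA_exact (PySem.Str.strip (PySem.Str.upper dn)) asg with
    | some a => simp
    | none =>
        simp only
        cases hP : PySem.Str.split₀ (PySem.Str.strip (PySem.Str.upper dn)) with
        | nil => simp
        | cons x xs =>
            simp only [List.isEmpty_cons, List.length_cons, Bool.false_eq_true, if_false]
            have hlen : 0 < xs.length + 1 := Nat.succ_pos _
            simp only [hlen, if_true]
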